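-- pv_equiv track=rewrite | github.com/samuveljohnson1416/Multi-Model-Ai-Agent-For-Automated-Health-Diagnostics | src/core/multi_report_manager.py | _determine_overall_trend
-- ===== SOURCE A (Python) =====
-- from typing import List, Dict, Any, Optional
--
-- def _determine_overall_trend(changes: List[Dict[str, Any]]) -> str:
--     """Determine overall trend from changes"""
--     if not changes:
--         return 'stable'
--
--     increases = sum(1 for c in changes if c['change_type'] == 'increase')
--     decreases = sum(1 for c in changes if c['change_type'] == 'decrease')
--
--     if increases > decreases:
--         return 'increasing'
--     elif decreases > increases:
--         return 'decreasing'
--     else: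
--         return 'stable'
-- ===== SOURCE B (Python) =====
-- def _determine_overall_trend(changes):
--     """Determine overall trend from changes (single-pass signed net accumulator)."""
--     net = 0
--     for c in changes:
--         t = c['change_type']
--         if t == 'increase':
--             net += 1
--         elif t == 'decrease':
--             net -= 1
--     return 'increasing' if net > 0 else 'decreasing' if net < 0 else 'stable'
-- ===== Notes on version B (the rewrite author's own statement) =====
-- stated objective: simpler
-- what changed: Replaces the empty-check, two counting comprehensions and a count comparison with a single pass maintaining one signed net counter (+1 increase, -1 decrease) and a sign test.
import Mathlib
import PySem

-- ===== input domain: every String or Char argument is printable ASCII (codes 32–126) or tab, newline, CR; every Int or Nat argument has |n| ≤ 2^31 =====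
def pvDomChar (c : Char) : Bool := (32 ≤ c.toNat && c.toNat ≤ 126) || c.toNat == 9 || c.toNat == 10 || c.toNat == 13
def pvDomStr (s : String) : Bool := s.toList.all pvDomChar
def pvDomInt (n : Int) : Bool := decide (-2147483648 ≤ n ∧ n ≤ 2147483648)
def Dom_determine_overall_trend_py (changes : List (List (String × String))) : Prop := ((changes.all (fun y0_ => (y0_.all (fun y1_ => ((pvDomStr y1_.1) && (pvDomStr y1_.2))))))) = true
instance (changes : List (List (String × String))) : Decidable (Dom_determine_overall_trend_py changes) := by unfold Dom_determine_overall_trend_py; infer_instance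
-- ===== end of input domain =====

-- B is a simpler single-pass re-implementation: one signed net accumulator and a sign test
-- instead of A's empty-check, two counting passes and a count comparison.

-- ===== PORT A =====
def determine_overall_trend_py (changes : List (List (String × String))) : String :=
  if changes = [] then "stable"
  else
    let increases : Int := changes.foldl (fun acc c =>
      if (PySem.Dict.mk c).get? "change_type" = some "increase" then acc + 1 else acc) 0
    let decreases : Int := changes.foldl (fun acc c =>
      if (PySem.Dict.mk c).get? "change_type" = some "decrease" then acc + 1 else acc) 0
    if increases > decreases then "increasing"
    else if decreases > increases then "decreasing"
    else "stable"

-- ===== PORT B =====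
def determine_overall_trend_py_alt (changes : List (List (String × String))) : String :=
  let net : Int := changes.foldl (fun n c =>
    match (PySem.Dict.mk c).get? "change_type" with
    | some t => if t = "increase" then n + 1 else if t = "decrease" then n - 1 else n
    | none => n) 0
  if net > 0 then "increasing" else if net < 0 then "decreasing" else "stable"

-- ===== PRECONDITION & SPEC =====
-- Pre_ excludes elements missing the 'change_type' key, on which Python A (and B) raise KeyError.
def Pre_determine_overall_trend_py (changes : List (List (String × String))) : Prop :=
  (changes.all (fun c => c.any (fun p => p.1 == "change_type"))) = true
instance (changes : List (List (String × String))) : Decidable (Pre_determine_overall_trend_py changes) := by unfold Pre_determine_overall_trend_py; infer_instance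
def pvWitness_determine_overall_trend_py : (List (List (String × String))) :=
  [[("change_type", "increase")], [("change_type", "stable")]]

def Spec_determine_overall_trend_py (changes : List (List (String × String))) (out : String) : Prop := out = determine_overall_trend_py_alt changes
instance (changes : List (List (String × String))) (out : String) : Decidable (Spec_determine_overall_trend_py changes out) := by unfold Spec_determine_overall_trend_py; infer_instance

-- ===== CLAIM (what is proved, stated in full; the proofs are below) =====
def Claim_equal_determine_overall_trend_py : Prop := ∀ (changes : List (List (String × String))), Dom_determine_overall_trend_py changes → Pre_determine_overall_trend_py changes → Spec_determine_overall_trend_py changes (determine_overall_trend_py changes)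

-- ===== LEMMAS AND PROOFS =====

-- step functions, named for the proofs only
def pvIncStep (acc : Int) (c : List (String × String)) : Int :=
  if (PySem.Dict.mk c).get? "change_type" = some "increase" then acc + 1 else acc
def pvDecStep (acc : Int) (c : List (String × String)) : Int :=
  if (PySem.Dict.mk c).get? "change_type" = some "decrease" then acc + 1 else acc
def pvNetStep (n : Int) (c : List (String × String)) : Int :=
  match (PySem.Dict.mk c).get? "change_type" with
  | some t => if t = "increase" then n + 1 else if t = "decrease" then n - 1 else n
  | none => n

theorem pvInc_shift (l : List (List (String × String))) : ∀ (a : Int),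
    l.foldl pvIncStep a = a + l.foldl pvIncStep 0 := by
  induction l with
  | nil => intro a; simp
  | cons c t ih =>
      intro a
      simp only [List.foldl_cons]
      rw [ih (pvIncStep a c), ih (pvIncStep 0 c)]
      unfold pvIncStep; split <;> ring

theorem pvDec_shift (l : List (List (String × String))) : ∀ (a : Int),
    l.foldl pvDecStep a = a + l.foldl pvDecStep 0 := by
  induction l with
  | nil => intro a; simp
  | cons c t ih =>
      intro a
      simp only [List.foldl_cons]
      rw [ih (pvDecStep a c), ih (pvDecStep 0 c)]
      unfold pvDecStep; split <;> ring

theorem pvNet_shift (l : List (List (String × String))) : ∀ (a : Int),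
    l.foldl pvNetStep a = a + l.foldl pvNetStep 0 := by
  induction l with
  | nil => intro a; simp
  | cons c t ih =>
      intro a
      simp only [List.foldl_cons]
      rw [ih (pvNetStep a c), ih (pvNetStep 0 c)]
      unfold pvNetStep
      cases (PySem.Dict.mk c).get? "change_type" with
      | none => ring
      | some s => dsimp only; split <;> [ring; (split <;> ring)]

theorem pvNet_eq (l : List (List (String × String))) :
    l.foldl pvNetStep 0 = l.foldl pvIncStep 0 - l.foldl pvDecStep 0 := by
  induction l with
  | nil => simp
  | cons c t ih =>
      simp only [List.foldl_cons]
      rw [pvNet_shift, pvInc_shift, pvDec_shift, ih]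
      unfold pvNetStep pvIncStep pvDecStep
      cases h : (PySem.Dict.mk c).get? "change_type" with
      | none => simp
      | some s =>
          dsimp only
          by_cases h1 : s = "increase"
          · subst h1; simp; ring
          · by_cases h2 : s = "decrease"
            · subst h2; simp; ring
            · simp [h1, h2]

-- ===== VERDICT (by name: the statement is the Claim_ definition above) =====
theorem determine_overall_trend_py_spec : Claim_equal_determine_overall_trend_py := by
  intro changes _ _
  unfold Spec_determine_overall_trend_py determine_overall_trend_py determine_overall_trend_py_alt
  show (if changes = [] then "stable"
    else
      let increases : Int := changes.foldl pvIncStep 0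
      let decreases : Int := changes.foldl pvDecStep 0
      if increases > decreases then "increasing"
      else if decreases > increases then "decreasing"
      else "stable") =
    (let net : Int := changes.foldl pvNetStep 0
     if net > 0 then "increasing" else if net < 0 then "decreasing" else "stable")
  rcases changes with _ | ⟨c, t⟩
  · simp
  · simp only [if_neg (by simp : ¬((c :: t : List (List (String × String))) = []))]
    rw [pvNet_eq]
    set i := (c :: t).foldl pvIncStep 0
    set d := (c :: t).foldl pvDecStep 0
    split_ifs <;> first | rfl | omega
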